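-- pv_equiv track=rewrite | github.com/HimeshSinghChauhan19/GFG_POTDS | numberFollowingAPattern.py | printMinNumberForPattern
-- ===== SOURCE A (Python) =====
-- def printMinNumberForPattern(S):
--     # will track the max number used till any pt. of time
--     curr_max=1
--     # will be used when will get D's, cause we need to store curr_max, so curr_num will only be updated in case of a D
--     curr_num=1
--
--     # dp[i] will contain the no. of consecutive D's after i'th position
--     dp=[0 for i in range(len(S))]
--     d_count=0
--
--     # handling D's at the starting of the string
--     start_d_count=0
--     for i in range(len(S)):
--         if(S[i]=='D'):
--             start_d_count+=1
--         else:
--             break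
--
--     # simply, the curr_max will start from (the d_count in the starting)+1
--     curr_max=start_d_count+1
--     curr_num=curr_max
--
--     ans=str(curr_max)
--
--
--     for i in range(len(S)-1,-1,-1):
--
--         if(S[i]=='D'):
--             d_count+=1
--         elif(d_count!=0):
--             dp[i]=d_count
--             d_count=0
--
--
--     for i in range(len(S)):
--
--         if(S[i]=='I'):
--
--             if(dp[i]!=0):
--                 # dp[i] will contain the no. of D's after this I
--                 curr_max=curr_max+dp[i]+1
--                 ans+=str(curr_max)
--                 curr_num=curr_max
--                 continue
--
--             # if there are no D's after this I, then just inc. the curr_max and append to ans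
--             ans+=str(curr_max+1)
--             curr_max+=1
--
--         if(S[i]=='D'):
--
--             # for a D, will just decr. the curr_num and append to ans
--             curr_num-=1
--             ans+=str(curr_num)
--
--     return ans
-- ===== SOURCE B (Python) =====
-- def printMinNumberForPattern(S):
--     n = len(S)
--     lead = 0
--     while lead < n and S[lead] == 'D':
--         lead += 1
--     curr_max = lead + 1
--     curr_num = curr_max
--     out = [str(curr_max)]
--     i = 0
--     while i < n:
--         c = S[i]
--         if c == 'I':
--             j = i + 1
--             while j < n and S[j] == 'D':
--                 j += 1
--             k = j - i - 1
--             curr_max += k + 1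
--             out.append(str(curr_max))
--             if k:
--                 # flush the following D-run at once as a descending block
--                 for v in range(curr_max - 1, curr_max - k - 1, -1):
--                     out.append(str(v))
--                 curr_num = curr_max - k
--                 i = j
--                 continue
--         elif c == 'D':
--             curr_num -= 1
--             out.append(str(curr_num))
--         i += 1
--     return ''.join(out)
-- ===== Notes on version B (the rewrite author's own statement) =====
-- stated objective: alternative
-- what changed: Replaces A's three passes (leading-decrease count, a backward dp array of trailing-decrease run lengths, then a per-character forward emission) by a single forward pass that, at each increase character, measures the following decrease run and emits the whole descending block at once (an implicit stack flush), jumping past the run; no dp array and no backward pass.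
import Mathlib
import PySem

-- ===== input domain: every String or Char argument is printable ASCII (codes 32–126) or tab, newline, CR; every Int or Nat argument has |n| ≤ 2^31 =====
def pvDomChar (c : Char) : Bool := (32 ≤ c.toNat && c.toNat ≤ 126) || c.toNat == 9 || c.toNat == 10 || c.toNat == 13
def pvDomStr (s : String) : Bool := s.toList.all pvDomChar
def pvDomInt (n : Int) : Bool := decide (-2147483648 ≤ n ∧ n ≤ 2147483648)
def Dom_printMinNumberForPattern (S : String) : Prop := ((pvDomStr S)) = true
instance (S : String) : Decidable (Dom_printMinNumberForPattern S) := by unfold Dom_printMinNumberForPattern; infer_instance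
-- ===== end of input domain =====

-- B replaces A's three passes (leading-decrease count, backward dp array of trailing-decrease run
-- lengths, per-character forward emission) by a single forward pass that, at each increase character,
-- measures the following decrease run and emits it at once as a descending block, jumping past it
-- (no dp array, no backward pass).

-- ===== PORT A =====

-- A's first loop: count leading 'D's, `break` on the first other char
def pvCountLeadD : List Char → Nat
  | [] => 0
  | c :: cs => if c = 'D' then pvCountLeadD cs + 1 else 0

-- A's backward loop over i = len-1 .. 0 building (dp, d_count); recursion from the right is that loop.
-- (when d_count = 0 A leaves dp[i] = 0, which `d_count :: dp` also yields)
def pvDpBuild : List Char → List Int × Int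
  | [] => ([], 0)
  | c :: cs =>
      let r := pvDpBuild cs
      if c = 'D' then (0 :: r.1, r.2 + 1) else (r.2 :: r.1, 0)

-- A's forward loop over i, reading S[i] and dp[i] in step; state (curr_max, curr_num, ans)
def pvFwd : List Char → List Int → Int → Int → String → String
  | [], _, _, _, ans => ans
  | _ :: _, [], _, _, ans => ans   -- unreachable: dp always has the same length as S
  | c :: cs, d :: ds, cm, cn, ans =>
      if c = 'I' then
        if d ≠ 0 then
          pvFwd cs ds (cm + d + 1) (cm + d + 1) (ans ++ PySem.Int.toStr (cm + d + 1))
        else pvFwd cs ds (cm + 1) cn (ans ++ PySem.Int.toStr (cm + 1))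
      else if c = 'D' then pvFwd cs ds cm (cn - 1) (ans ++ PySem.Int.toStr (cn - 1))
      else pvFwd cs ds cm cn ans

def printMinNumberForPattern (S : String) : String :=
  let cs := S.toList
  let curr_max : Int := (pvCountLeadD cs : Int) + 1
  pvFwd cs (pvDpBuild cs).1 curr_max curr_max (PySem.Int.toStr curr_max)

-- ===== PORT B =====

-- B's leading `while lead < n and S[lead] == 'D'` loop
def pvLeadB : List Char → Nat
  | [] => 0
  | c :: cs => if c = 'D' then pvLeadB cs + 1 else 0

-- B's inner `while j < n and S[j] == 'D'` lookahead
def pvRunLen : List Char → Nat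
  | [] => 0
  | c :: cs => if c = 'D' then pvRunLen cs + 1 else 0

-- B's `for v in range(curr_max - 1, curr_max - k - 1, -1)` block emission
def pvEmitRun : Int → Nat → String → String
  | _, 0, out => out
  | t, k + 1, out => pvEmitRun (t - 1) k (out ++ PySem.Int.toStr t)

-- B's main loop; the 'I'-with-run branch emits the whole run and drops it (the `i = j; continue`)
def pvGoB : List Char → Int → Int → String → String
  | [], _, _, out => out
  | c :: cs, cm, cn, out =>
      if c = 'I' then
        let k := pvRunLen cs
        if k ≠ 0 then
          pvGoB (cs.drop k) (cm + (k : Int) + 1) (cm + 1)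
            (pvEmitRun (cm + (k : Int)) k (out ++ PySem.Int.toStr (cm + (k : Int) + 1)))
        else pvGoB cs (cm + 1) cn (out ++ PySem.Int.toStr (cm + 1))
      else if c = 'D' then pvGoB cs cm (cn - 1) (out ++ PySem.Int.toStr (cn - 1))
      else pvGoB cs cm cn out
termination_by cs _ _ _ => cs.length
decreasing_by all_goals (simp only [List.length_drop, List.length_cons]; omega)

def printMinNumberForPattern_alt (S : String) : String :=
  let cs := S.toList
  let curr_max : Int := (pvLeadB cs : Int) + 1
  pvGoB cs curr_max curr_max (PySem.Int.toStr curr_max)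

-- ===== PRECONDITION & SPEC =====
def Spec_printMinNumberForPattern (S : String) (out : String) : Prop := out = printMinNumberForPattern_alt S
instance (S : String) (out : String) : Decidable (Spec_printMinNumberForPattern S out) := by unfold Spec_printMinNumberForPattern; infer_instance

-- ===== CLAIM (what is proved, stated in full; the proofs are below) =====
def Claim_equal_printMinNumberForPattern : Prop := ∀ (S : String), Dom_printMinNumberForPattern S → Spec_printMinNumberForPattern S (printMinNumberForPattern S)

-- ===== LEMMAS AND PROOFS =====

theorem pvLeadB_eq (cs : List Char) : pvLeadB cs = pvCountLeadD cs := by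
  induction cs with
  | nil => rfl
  | cons c cs ih => simp [pvLeadB, pvCountLeadD, ih]

theorem pvRunLen_eq (cs : List Char) : pvRunLen cs = pvCountLeadD cs := by
  induction cs with
  | nil => rfl
  | cons c cs ih => simp [pvRunLen, pvCountLeadD, ih]

theorem pvDpBuild_snd (cs : List Char) : (pvDpBuild cs).2 = (pvCountLeadD cs : Int) := by
  induction cs with
  | nil => simp [pvDpBuild, pvCountLeadD]
  | cons c cs ih =>
    by_cases h : c = 'D'
    · simp [pvDpBuild, pvCountLeadD, h, ih]
    · simp [pvDpBuild, pvCountLeadD, h, ih]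

-- A's forward loop walks a block of k leading 'D's one by one, emitting cn-1, cn-2, …, cn-k:
-- exactly B's pvEmitRun block
theorem pvFwd_run (k : Nat) : ∀ (cs : List Char) (cm cn : Int) (ans : String),
    k ≤ pvCountLeadD cs →
    pvFwd cs (pvDpBuild cs).1 cm cn ans
      = pvFwd (cs.drop k) (pvDpBuild (cs.drop k)).1 cm (cn - (k : Int)) (pvEmitRun (cn - 1) k ans) := by
  induction k with
  | zero => intro cs cm cn ans _; simp [pvEmitRun]
  | succ k ih =>
    intro cs cm cn ans hk
    cases cs with
    | nil => simp [pvCountLeadD] at hk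
    | cons c cs =>
      have hc : c = 'D' := by
        by_contra h
        simp [pvCountLeadD, h] at hk
      have hk' : k ≤ pvCountLeadD cs := by
        simp [pvCountLeadD, hc] at hk; omega
      have step : pvFwd (c :: cs) (pvDpBuild (c :: cs)).1 cm cn ans
          = pvFwd cs (pvDpBuild cs).1 cm (cn - 1) (ans ++ PySem.Int.toStr (cn - 1)) := by
        simp [pvDpBuild, pvFwd, hc]
      rw [step, ih cs cm (cn - 1) (ans ++ PySem.Int.toStr (cn - 1)) hk']
      have e : cn - 1 - (k : Int) = cn - ((k : Nat) + 1 : Nat) := by push_cast; ring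
      rw [e]
      rfl

theorem pvFwd_eq_goB (n : Nat) : ∀ (cs : List Char), cs.length ≤ n → ∀ (cm cn : Int) (ans : String),
    pvFwd cs (pvDpBuild cs).1 cm cn ans = pvGoB cs cm cn ans := by
  induction n with
  | zero =>
    intro cs hlen cm cn ans
    have : cs = [] := List.eq_nil_of_length_eq_zero (Nat.le_zero.mp hlen)
    subst this; simp [pvFwd, pvGoB]
  | succ n ih =>
    intro cs hlen cm cn ans
    cases cs with
    | nil => simp [pvFwd, pvGoB]
    | cons c cs =>
      have hlen' : cs.length ≤ n := by simp at hlen; omega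
      by_cases hI : c = 'I'
      · by_cases hk : pvCountLeadD cs = 0
        · have stepA : pvFwd (c :: cs) (pvDpBuild (c :: cs)).1 cm cn ans
              = pvFwd cs (pvDpBuild cs).1 (cm + 1) cn (ans ++ PySem.Int.toStr (cm + 1)) := by
            simp [pvDpBuild, pvFwd, hI, pvDpBuild_snd, hk]
          rw [stepA, ih cs hlen']
          rw [show pvGoB (c :: cs) cm cn ans
                = pvGoB cs (cm + 1) cn (ans ++ PySem.Int.toStr (cm + 1)) from by
            rw [pvGoB]; simp [hI, pvRunLen_eq, hk]]
        · have hki : ((pvCountLeadD cs : Int)) ≠ 0 := by exact_mod_cast hk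
          have stepA : pvFwd (c :: cs) (pvDpBuild (c :: cs)).1 cm cn ans
              = pvFwd cs (pvDpBuild cs).1 (cm + (pvCountLeadD cs : Int) + 1)
                  (cm + (pvCountLeadD cs : Int) + 1)
                  (ans ++ PySem.Int.toStr (cm + (pvCountLeadD cs : Int) + 1)) := by
            simp [pvDpBuild, pvFwd, hI, pvDpBuild_snd]
            intro h; exact absurd h hk
          rw [stepA, pvFwd_run (pvCountLeadD cs) cs _ _ _ (le_refl _)]
          have e1 : cm + (pvCountLeadD cs : Int) + 1 - (pvCountLeadD cs : Int) = cm + 1 := by ring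
          have e2 : cm + (pvCountLeadD cs : Int) + 1 - 1 = cm + (pvCountLeadD cs : Int) := by ring
          rw [e1, e2]
          rw [ih (cs.drop (pvCountLeadD cs)) (by simp; omega)]
          rw [show pvGoB (c :: cs) cm cn ans
                = pvGoB (cs.drop (pvCountLeadD cs)) (cm + (pvCountLeadD cs : Int) + 1) (cm + 1)
                    (pvEmitRun (cm + (pvCountLeadD cs : Int)) (pvCountLeadD cs)
                      (ans ++ PySem.Int.toStr (cm + (pvCountLeadD cs : Int) + 1))) from by
            rw [pvGoB]; simp [hI, pvRunLen_eq, hk]]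
      · by_cases hD : c = 'D'
        · have stepA : pvFwd (c :: cs) (pvDpBuild (c :: cs)).1 cm cn ans
              = pvFwd cs (pvDpBuild cs).1 cm (cn - 1) (ans ++ PySem.Int.toStr (cn - 1)) := by
            simp [pvDpBuild, pvFwd, hD]
          rw [stepA, ih cs hlen']
          rw [show pvGoB (c :: cs) cm cn ans
                = pvGoB cs cm (cn - 1) (ans ++ PySem.Int.toStr (cn - 1)) from by
            rw [pvGoB]; simp [hD]]
        · have stepA : pvFwd (c :: cs) (pvDpBuild (c :: cs)).1 cm cn ans
              = pvFwd cs (pvDpBuild cs).1 cm cn ans := by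
            simp [pvDpBuild, pvFwd, hI, hD]
          rw [stepA, ih cs hlen']
          rw [show pvGoB (c :: cs) cm cn ans = pvGoB cs cm cn ans from by
            rw [pvGoB]; simp [hI, hD]]

-- ===== VERDICT (by name: the statement is the Claim_ definition above) =====
theorem printMinNumberForPattern_spec : Claim_equal_printMinNumberForPattern := by
  intro S _
  unfold Spec_printMinNumberForPattern
  show pvFwd S.toList (pvDpBuild S.toList).1 ((pvCountLeadD S.toList : Int) + 1)
      ((pvCountLeadD S.toList : Int) + 1) (PySem.Int.toStr ((pvCountLeadD S.toList : Int) + 1))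
    = pvGoB S.toList ((pvLeadB S.toList : Int) + 1) ((pvLeadB S.toList : Int) + 1)
      (PySem.Int.toStr ((pvLeadB S.toList : Int) + 1))
  rw [pvLeadB_eq]
  exact pvFwd_eq_goB S.toList.length S.toList (le_refl _) _ _ _
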